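-- pv_equiv track=rewrite | github.com/teije05-art/PJJ-Parallel-DEV | mem-agent-mcp/research_agent.py | _synthesize_summary
-- ===== SOURCE A (Python) =====
-- from typing import List, Dict, Optional, Tuple
--
-- def _synthesize_summary(
--
--     queries: List[str],
--     data_points: List[str],
--     sources: List[str]
-- ) -> str:
--     """Create a structured summary of research findings."""
--
--     summary = []
--     summary.append("# Research Findings\n")
--
--     if queries:
--         summary.append("## Search Queries Used")
--         for i, q in enumerate(queries, 1):
--             summary.append(f"{i}. {q}")
--         summary.append("")
--
--     if data_points:
--         summary.append("## Key Data Points Found")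
--         # Group by type
--         percentages = [d for d in data_points if "%" in d]
--         growth = [d for d in data_points if "growth" in d.lower()]
--         amounts = [d for d in data_points if "amount" in d.lower()]
--         metrics = [d for d in data_points if any(m in d.upper() for m in ["ARR", "MRR", "CAC", "LTV"])]
--         other = [d for d in data_points if d not in percentages + growth + amounts + metrics]
--
--         if percentages:
--             summary.append("### Percentages & Rates")
--             for p in percentages[:5]:  # Top 5
--                 summary.append(f"- {p}")
--
--         if growth:
--             summary.append("### Growth Indicators")
--             for g in growth[:5]:
--                 summary.append(f"- {g}")
--
--         if amounts:
--             summary.append("### Financial Figures")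
--             for a in amounts[:5]:
--                 summary.append(f"- {a}")
--
--         if metrics:
--             summary.append("### Key Metrics")
--             for m in metrics[:5]:
--                 summary.append(f"- {m}")
--
--         if other:
--             summary.append("### Other Findings")
--             for o in other[:5]:
--                 summary.append(f"- {o}")
--
--         summary.append("")
--
--     if sources:
--         summary.append("## Sources Consulted")
--         for i, src in enumerate(sources[:5], 1):  # Top 5 sources
--             summary.append(f"{i}. {src}")
--
--     return "\n".join(summary)
-- ===== SOURCE B (Python) =====
-- from typing import List
--
--
-- def _synthesize_summary(
--     queries: List[str],
--     data_points: List[str],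
--     sources: List[str]
-- ) -> str:
--     """Single pass over data_points with five accumulators; sections built
--     independently and concatenated (instead of A's five full-list scans plus
--     a quadratic list-membership test for 'other')."""
--
--     head = ["# Research Findings\n"]
--
--     qpart = []
--     if queries:
--         qpart = (["## Search Queries Used"]
--                  + [f"{i}. {q}" for i, q in enumerate(queries, 1)]
--                  + [""])
--
--     dpart = []
--     if data_points:
--         percentages, growth, amounts, metrics, other = [], [], [], [], []
--         for d in data_points:
--             low, up = d.lower(), d.upper()
--             c1 = "%" in d
--             c2 = "growth" in low
--             c3 = "amount" in low
--             c4 = any(k in up for k in ("ARR", "MRR", "CAC", "LTV"))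
--             if c1:
--                 percentages.append(d)
--             if c2:
--                 growth.append(d)
--             if c3:
--                 amounts.append(d)
--             if c4:
--                 metrics.append(d)
--             if not (c1 or c2 or c3 or c4):
--                 other.append(d)
--         body = []
--         for title, items in (("### Percentages & Rates", percentages),
--                              ("### Growth Indicators", growth),
--                              ("### Financial Figures", amounts),
--                              ("### Key Metrics", metrics),
--                              ("### Other Findings", other)):
--             if items:
--                 body.append(title)
--                 body += ["- " + x for x in items[:5]]
--         dpart = ["## Key Data Points Found"] + body + [""]
--
--     spart = []
--     if sources:
--         spart = (["## Sources Consulted"]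
--                  + [f"{i}. {s}" for i, s in enumerate(sources[:5], 1)])
--
--     return "\n".join(head + qpart + dpart + spart)
-- ===== Notes on version B (the rewrite author's own statement) =====
-- stated objective: faster
-- what changed: Replaces A's five separate full-list comprehension scans plus the list-concatenation membership test for 'other' with a single pass that classifies each data point once into five accumulators (other = matched none of the four conditions), and assembles the summary from independently built sections that are concatenated at the end.
import Mathlib
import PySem

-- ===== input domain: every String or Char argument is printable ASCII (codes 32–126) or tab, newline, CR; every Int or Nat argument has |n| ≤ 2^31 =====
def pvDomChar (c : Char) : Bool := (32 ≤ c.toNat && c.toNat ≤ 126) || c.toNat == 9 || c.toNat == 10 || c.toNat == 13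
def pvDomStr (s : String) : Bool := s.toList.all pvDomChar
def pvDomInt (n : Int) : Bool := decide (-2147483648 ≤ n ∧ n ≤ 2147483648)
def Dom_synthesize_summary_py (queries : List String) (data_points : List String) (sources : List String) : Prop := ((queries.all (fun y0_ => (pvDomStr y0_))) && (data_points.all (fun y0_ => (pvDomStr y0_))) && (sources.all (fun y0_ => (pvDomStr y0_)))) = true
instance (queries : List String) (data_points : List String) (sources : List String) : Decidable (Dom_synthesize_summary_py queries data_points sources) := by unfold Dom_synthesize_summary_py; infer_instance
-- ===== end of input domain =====

-- B makes one pass over data_points with five accumulators (instead of A's five scans plus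
-- a membership test against the concatenated buckets) and builds the summary from
-- independently assembled sections; equivalence is proved on all inputs.

-- ===== PORT A =====
-- the four category tests, shared vocabulary of both ports
def pvC1 (d : String) : Bool := PySem.Str.isIn "%" d
def pvC2 (d : String) : Bool := PySem.Str.isIn "growth" (PySem.Str.lower d)
def pvC3 (d : String) : Bool := PySem.Str.isIn "amount" (PySem.Str.lower d)
def pvC4 (d : String) : Bool := ["ARR", "MRR", "CAC", "LTV"].any (fun m => PySem.Str.isIn m (PySem.Str.upper d))

def synthesize_summary_py (queries : List String) (data_points : List String) (sources : List String) : String :=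
  let summary : List String := []
  let summary := summary ++ ["# Research Findings\n"]
  let summary :=
    if !queries.isEmpty then
      let summary := summary ++ ["## Search Queries Used"]
      let summary := (PySem.List.enumerate queries 1).foldl
        (fun acc iq => acc ++ [PySem.Int.toStr iq.1 ++ ". " ++ iq.2]) summary
      summary ++ [""]
    else summary
  let summary :=
    if !data_points.isEmpty then
      let summary := summary ++ ["## Key Data Points Found"]
      let percentages := data_points.filter (fun d => pvC1 d)
      let growth := data_points.filter (fun d => pvC2 d)
      let amounts := data_points.filter (fun d => pvC3 d)
      let metrics := data_points.filter (fun d => pvC4 d)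
      let other := data_points.filter
        (fun d => !((percentages ++ growth ++ amounts ++ metrics).contains d))
      let summary :=
        if !percentages.isEmpty then
          (PySem.List.slice percentages none (some 5)).foldl
            (fun acc p => acc ++ ["- " ++ p]) (summary ++ ["### Percentages & Rates"])
        else summary
      let summary :=
        if !growth.isEmpty then
          (PySem.List.slice growth none (some 5)).foldl
            (fun acc g => acc ++ ["- " ++ g]) (summary ++ ["### Growth Indicators"])
        else summary
      let summary :=
        if !amounts.isEmpty then
          (PySem.List.slice amounts none (some 5)).foldl
            (fun acc a => acc ++ ["- " ++ a]) (summary ++ ["### Financial Figures"])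
        else summary
      let summary :=
        if !metrics.isEmpty then
          (PySem.List.slice metrics none (some 5)).foldl
            (fun acc m => acc ++ ["- " ++ m]) (summary ++ ["### Key Metrics"])
        else summary
      let summary :=
        if !other.isEmpty then
          (PySem.List.slice other none (some 5)).foldl
            (fun acc o => acc ++ ["- " ++ o]) (summary ++ ["### Other Findings"])
        else summary
      summary ++ [""]
    else summary
  let summary :=
    if !sources.isEmpty then
      (PySem.List.enumerate (PySem.List.slice sources none (some 5)) 1).foldl
        (fun acc is => acc ++ [PySem.Int.toStr is.1 ++ ". " ++ is.2])
        (summary ++ ["## Sources Consulted"])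
    else summary
  PySem.Str.join "\n" summary

-- ===== PORT B =====
-- single pass: (percentages, growth, amounts, metrics, other)
def pvBuckets (data_points : List String) :
    List String × List String × List String × List String × List String :=
  data_points.foldl
    (fun st d =>
      let c1 := pvC1 d
      let c2 := pvC2 d
      let c3 := pvC3 d
      let c4 := pvC4 d
      (if c1 then st.1 ++ [d] else st.1,
       if c2 then st.2.1 ++ [d] else st.2.1,
       if c3 then st.2.2.1 ++ [d] else st.2.2.1,
       if c4 then st.2.2.2.1 ++ [d] else st.2.2.2.1,
       if !(c1 || c2 || c3 || c4) then st.2.2.2.2 ++ [d] else st.2.2.2.2))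
    ([], [], [], [], [])

def synthesize_summary_py_alt (queries : List String) (data_points : List String) (sources : List String) : String :=
  let head : List String := ["# Research Findings\n"]
  let qpart : List String :=
    if !queries.isEmpty then
      ["## Search Queries Used"]
        ++ (PySem.List.enumerate queries 1).map (fun iq => PySem.Int.toStr iq.1 ++ ". " ++ iq.2)
        ++ [""]
    else []
  let dpart : List String :=
    if !data_points.isEmpty then
      let b := pvBuckets data_points
      let body := [("### Percentages & Rates", b.1),
                   ("### Growth Indicators", b.2.1),
                   ("### Financial Figures", b.2.2.1),
                   ("### Key Metrics", b.2.2.2.1),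
                   ("### Other Findings", b.2.2.2.2)].foldl
        (fun body ti =>
          if !ti.2.isEmpty then
            (body ++ [ti.1]) ++ (PySem.List.slice ti.2 none (some 5)).map (fun x => "- " ++ x)
          else body) []
      ["## Key Data Points Found"] ++ body ++ [""]
    else []
  let spart : List String :=
    if !sources.isEmpty then
      ["## Sources Consulted"]
        ++ (PySem.List.enumerate (PySem.List.slice sources none (some 5)) 1).map
            (fun is => PySem.Int.toStr is.1 ++ ". " ++ is.2)
    else []
  PySem.Str.join "\n" (head ++ qpart ++ dpart ++ spart)

-- ===== PRECONDITION & SPEC =====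
def Spec_synthesize_summary_py (queries : List String) (data_points : List String) (sources : List String) (out : String) : Prop := out = synthesize_summary_py_alt queries data_points sources
instance (queries : List String) (data_points : List String) (sources : List String) (out : String) : Decidable (Spec_synthesize_summary_py queries data_points sources out) := by unfold Spec_synthesize_summary_py; infer_instance

-- ===== CLAIM (what is proved, stated in full; the proofs are below) =====
def Claim_equal_synthesize_summary_py : Prop := ∀ (queries : List String) (data_points : List String) (sources : List String), Dom_synthesize_summary_py queries data_points sources → Spec_synthesize_summary_py queries data_points sources (synthesize_summary_py queries data_points sources)

-- ===== LEMMAS AND PROOFS =====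

theorem pvBucketsAux (l : List String) (a b c d e : List String) :
    l.foldl
      (fun st d =>
        let c1 := pvC1 d
        let c2 := pvC2 d
        let c3 := pvC3 d
        let c4 := pvC4 d
        (if c1 then st.1 ++ [d] else st.1,
         if c2 then st.2.1 ++ [d] else st.2.1,
         if c3 then st.2.2.1 ++ [d] else st.2.2.1,
         if c4 then st.2.2.2.1 ++ [d] else st.2.2.2.1,
         if !(c1 || c2 || c3 || c4) then st.2.2.2.2 ++ [d] else st.2.2.2.2))
      (a, b, c, d, e)
    = (a ++ l.filter (fun x => pvC1 x),
       b ++ l.filter (fun x => pvC2 x),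
       c ++ l.filter (fun x => pvC3 x),
       d ++ l.filter (fun x => pvC4 x),
       e ++ l.filter (fun x => !(pvC1 x || pvC2 x || pvC3 x || pvC4 x))) := by
  induction l generalizing a b c d e with
  | nil => simp
  | cons x xs ih =>
    simp only [List.foldl_cons, List.filter_cons]
    rw [ih]
    split_ifs <;> simp_all

theorem pvBuckets_eq (data_points : List String) :
    pvBuckets data_points =
      (data_points.filter (fun d => pvC1 d),
       data_points.filter (fun d => pvC2 d),
       data_points.filter (fun d => pvC3 d),
       data_points.filter (fun d => pvC4 d),
       data_points.filter (fun d => !(pvC1 d || pvC2 d || pvC3 d || pvC4 d))) := by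
  unfold pvBuckets
  rw [pvBucketsAux]
  simp

theorem pvOther_eq (data_points : List String) :
    data_points.filter
      (fun d => !((data_points.filter (fun d => pvC1 d) ++ data_points.filter (fun d => pvC2 d)
          ++ data_points.filter (fun d => pvC3 d) ++ data_points.filter (fun d => pvC4 d)).contains d))
    = data_points.filter (fun d => !(pvC1 d || pvC2 d || pvC3 d || pvC4 d)) := by
  apply List.filter_congr
  intro d hd
  simp [hd, Bool.and_assoc]

-- ===== VERDICT (by name: the statement is the Claim_ definition above) =====
set_option maxHeartbeats 4000000 in
theorem synthesize_summary_py_spec : Claim_equal_synthesize_summary_py := by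
  intro queries data_points sources _
  unfold Spec_synthesize_summary_py synthesize_summary_py synthesize_summary_py_alt
  rw [pvBuckets_eq]
  simp only [PySem.List.foldl_append_singleton_eq_map, List.foldl_cons, List.foldl_nil,
    pvOther_eq]
  by_cases hq : queries.isEmpty <;> by_cases hdp : data_points.isEmpty <;>
    by_cases hs : sources.isEmpty <;>
    by_cases hp1 : (data_points.filter (fun d => pvC1 d)).isEmpty <;>
    by_cases hp2 : (data_points.filter (fun d => pvC2 d)).isEmpty <;>
    by_cases hp3 : (data_points.filter (fun d => pvC3 d)).isEmpty <;>
    by_cases hp4 : (data_points.filter (fun d => pvC4 d)).isEmpty <;>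
    by_cases hp5 : (data_points.filter (fun d => !(pvC1 d || pvC2 d || pvC3 d || pvC4 d))).isEmpty <;>
    simp [hq, hdp, hs, hp1, hp2, hp3, hp4, List.append_assoc] <;> split_ifs <;> simp_all
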